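-- pv_equiv track=rewrite | github.com/Tommo499/XandOAI | AIDataSetup.py | redundant
-- ===== SOURCE A (Python) =====
-- winConditions = ('123', '456', '789', '147', '258', '369', '159', '357')
--
-- def fully_contained(sub, container):
--     for item in sub:
--         if not item in container:
--             return False
--     return True
--
-- def redundant(game):  # checks if the game could have been ended earlier, only for games that have 6 rounds played
--     if len(game) >= 6:
--         for segment in range(5, len(game) + 1):
--             partgame = game[:segment]
--             player1 = ''.join(sorted(list(partgame[0::2])))
--             player2 = ''.join(sorted(list(partgame[1::2])))
--             for item in winConditions:
--                 if fully_contained(item, player1) and segment < len(game):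
--                     return True
--                 elif fully_contained(item, player2) and segment < len(game):
--                     return True
--     return False
-- ===== SOURCE B (Python) =====
-- winConditions = ('123', '456', '789', '147', '258', '369', '159', '357')
--
-- def redundant(game):
--     n = len(game)
--     p1, p2 = set(), set()
--     for i, ch in enumerate(game):
--         if i % 2 == 0:
--             p1.add(ch)
--         else:
--             p2.add(ch)
--         if i >= 4 and i + 1 < n:
--             if any(all(c in p1 for c in w) or all(c in p2 for c in w)
--                    for w in winConditions):
--                 return True
--     return False
-- ===== Notes on version B (the rewrite author's own statement) =====
-- stated objective: faster
-- what changed: Replaces A's per-prefix re-slicing, re-sorting and full rescan (a prefix loop that rebuilds both players' sorted move strings from scratch for every segment) with one incremental forward pass that maintains the two players' move sets and checks the win conditions against the sets after each move, returning early; no slicing or sorting at all.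
import Mathlib
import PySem

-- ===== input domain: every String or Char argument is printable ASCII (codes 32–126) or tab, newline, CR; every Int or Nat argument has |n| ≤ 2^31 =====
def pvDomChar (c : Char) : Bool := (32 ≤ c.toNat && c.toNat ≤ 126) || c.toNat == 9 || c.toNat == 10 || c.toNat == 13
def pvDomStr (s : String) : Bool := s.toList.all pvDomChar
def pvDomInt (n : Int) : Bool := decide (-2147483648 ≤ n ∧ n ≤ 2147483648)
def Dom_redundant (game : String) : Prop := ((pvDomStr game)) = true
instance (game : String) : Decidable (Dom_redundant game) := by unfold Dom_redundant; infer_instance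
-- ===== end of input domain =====

-- B replaces A's per-prefix slicing/sorting/rescan with one incremental pass maintaining both
-- players' move sets (objective: faster).

-- ===== PORT A =====
def winConditions : List String := ["123", "456", "789", "147", "258", "369", "159", "357"]

def fully_contained (sub container : List Char) : Bool :=
  sub.all (fun c => container.contains c)

def redundant (game : String) : Bool :=
  let gs := game.toList
  if 6 ≤ gs.length then
    (PySem.List.pyRange 5 ((gs.length : Int) + 1) 1).any (fun segment =>
      let partgame := PySem.List.slice gs none (some segment)
      let player1 := PySem.List.sorted ((PySem.List.slice? partgame (some 0) none 2).getD []) (fun c => c) false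
      let player2 := PySem.List.sorted ((PySem.List.slice? partgame (some 1) none 2).getD []) (fun c => c) false
      winConditions.any (fun item =>
        (fully_contained item.toList player1 && decide (segment < (gs.length : Int))) ||
        (fully_contained item.toList player2 && decide (segment < (gs.length : Int)))))
  else false

-- ===== PORT B =====
def altWin (p1 p2 : PySem.Set Char) : Bool :=
  winConditions.any (fun w =>
    w.toList.all (fun c => PySem.Set.contains p1 c) ||
    w.toList.all (fun c => PySem.Set.contains p2 c))

def altGo (n : Nat) : Nat → PySem.Set Char → PySem.Set Char → List Char → Bool
  | _, _, _, [] => false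
  | i, p1, p2, ch :: rest =>
    let p1' := if i % 2 = 0 then PySem.Set.add p1 ch else p1
    let p2' := if i % 2 = 0 then p2 else PySem.Set.add p2 ch
    if 4 ≤ i ∧ i + 1 < n then
      if altWin p1' p2' then true
      else altGo n (i + 1) p1' p2' rest
    else altGo n (i + 1) p1' p2' rest

def redundant_alt (game : String) : Bool :=
  let gs := game.toList
  altGo gs.length 0 PySem.Set.empty PySem.Set.empty gs


-- ===== PRECONDITION & SPEC =====
def Spec_redundant (game : String) (out : Bool) : Prop := out = redundant_alt game
instance (game : String) (out : Bool) : Decidable (Spec_redundant game out) := by unfold Spec_redundant; infer_instance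

-- ===== CLAIM (what is proved, stated in full; the proofs are below) =====
def Claim_equal_redundant : Prop := ∀ (game : String), Dom_redundant game → Spec_redundant game (redundant game)

-- ===== LEMMAS AND PROOFS =====


mutual
def evens {α : Type} : List α → List α
  | [] => []
  | x :: rest => x :: odds rest
def odds {α : Type} : List α → List α
  | [] => []
  | _ :: rest => evens rest
end

def winAt (gs : List Char) (k : Nat) : Bool :=
  winConditions.any (fun w =>
    w.toList.all (fun c => decide (c ∈ evens (gs.take k))) ||
    w.toList.all (fun c => decide (c ∈ odds (gs.take k))))

mutual
theorem mem_evens {α : Type} (l : List α) (x : α) : x ∈ evens l ↔ ∃ k, l[2*k]? = some x := by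
  match l with
  | [] => simp [evens]
  | a :: rest =>
    rw [evens]
    simp only [List.mem_cons, mem_odds rest x]
    constructor
    · rintro (rfl | ⟨k, hk⟩)
      · exact ⟨0, by simp⟩
      · exact ⟨k+1, by simpa [List.getElem?_cons, Nat.mul_add] using hk⟩
    · rintro ⟨k, hk⟩
      match k with
      | 0 => left; exact (by simpa using hk : a = x).symm
      | k+1 => right; exact ⟨k, by simpa [List.getElem?_cons, Nat.mul_add] using hk⟩
theorem mem_odds {α : Type} (l : List α) (x : α) : x ∈ odds l ↔ ∃ k, l[2*k+1]? = some x := by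
  match l with
  | [] => simp [odds]
  | a :: rest =>
    rw [odds]
    rw [mem_evens rest x]
    constructor
    · rintro ⟨k, hk⟩
      exact ⟨k, by simpa [List.getElem?_cons] using hk⟩
    · rintro ⟨k, hk⟩
      exact ⟨k, by simpa [List.getElem?_cons] using hk⟩
end

theorem mem_slice2 {α : Type} (xs : List α) (x : α) :
    x ∈ (PySem.List.slice? xs (some 0) none 2).getD [] ↔ x ∈ evens xs := by
  rw [mem_evens]
  simp only [PySem.List.slice?, PySem.List.sliceIndices]
  norm_num
  constructor
  · rintro ⟨a, _, hx⟩
    refine ⟨a, ?_⟩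
    have h2 : ((2 * (a:Int)).toNat) = 2 * a := by omega
    rwa [h2] at hx
  · rintro ⟨k, hk⟩
    have hlt : 2 * k < xs.length := (List.getElem?_eq_some_iff.mp hk).1
    refine ⟨k, ?_, ?_⟩
    · rw [if_pos (by omega)]
      omega
    · have h2 : ((2 * (k:Int)).toNat) = 2 * k := by omega
      rwa [h2]

theorem mem_slice2_one {α : Type} (xs : List α) (x : α) :
    x ∈ (PySem.List.slice? xs (some 1) none 2).getD [] ↔ x ∈ odds xs := by
  rw [mem_odds]
  simp only [PySem.List.slice?, PySem.List.sliceIndices]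
  norm_num
  by_cases hlen : 1 < xs.length
  · have hmin : min 1 (xs.length : Int) = 1 := by omega
    rw [hmin, if_pos (by exact_mod_cast hlen)]
    constructor
    · rintro ⟨a, _, hx⟩
      refine ⟨a, ?_⟩
      have h2 : ((1 + 2 * (a:Int)).toNat) = 2 * a + 1 := by omega
      rwa [h2] at hx
    · rintro ⟨k, hk⟩
      have hlt : 2 * k + 1 < xs.length := (List.getElem?_eq_some_iff.mp hk).1
      refine ⟨k, by omega, ?_⟩
      have h2 : ((1 + 2 * (k:Int)).toNat) = 2 * k + 1 := by omega
      rwa [h2]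
  · rw [if_neg (by exact_mod_cast hlen)]
    simp only [Nat.not_lt_zero, false_and, exists_false, false_iff, not_exists]
    intro k hk
    have hlt : 2 * k + 1 < xs.length := (List.getElem?_eq_some_iff.mp hk).1
    omega

-- A's per-prefix check equals winAt
theorem fc_sorted_zero (sub pref : List Char) :
    fully_contained sub (PySem.List.sorted ((PySem.List.slice? pref (some 0) none 2).getD []) (fun c => c) false) = true
      ↔ ∀ c ∈ sub, c ∈ evens pref := by
  simp only [fully_contained, List.all_eq_true, List.contains_iff_mem, PySem.List.mem_sorted,
    mem_slice2]

theorem fc_sorted_one (sub pref : List Char) :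
    fully_contained sub (PySem.List.sorted ((PySem.List.slice? pref (some 1) none 2).getD []) (fun c => c) false) = true
      ↔ ∀ c ∈ sub, c ∈ odds pref := by
  simp only [fully_contained, List.all_eq_true, List.contains_iff_mem, PySem.List.mem_sorted,
    mem_slice2_one]

theorem redundant_iff (game : String) :
    redundant game = true ↔
      ∃ k : Nat, 5 ≤ k ∧ k < game.toList.length ∧ winAt game.toList k = true := by
  unfold redundant
  set gs := game.toList with hgs
  by_cases h6 : 6 ≤ gs.length
  · rw [if_pos h6]
    rw [List.any_eq_true]
    constructor
    · rintro ⟨seg, hseg, hin⟩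
      rw [PySem.List.mem_pyRange_one] at hseg
      obtain ⟨h5, hub⟩ := hseg
      rw [List.any_eq_true] at hin
      obtain ⟨item, hitem, hcond⟩ := hin
      have hslice : PySem.List.slice gs none (some seg) = gs.take seg.toNat :=
        PySem.List.slice_to (xs := gs) (b := seg) (by omega)
      rw [hslice] at hcond
      rw [Bool.or_eq_true, Bool.and_eq_true, Bool.and_eq_true] at hcond
      have hlt : seg < (gs.length : Int) := by
        rcases hcond with ⟨_, h⟩ | ⟨_, h⟩ <;> simpa using h
      refine ⟨seg.toNat, by omega, by omega, ?_⟩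
      rw [winAt, List.any_eq_true]
      refine ⟨item, hitem, ?_⟩
      rw [Bool.or_eq_true, List.all_eq_true, List.all_eq_true]
      rcases hcond with ⟨h, _⟩ | ⟨h, _⟩
      · left; intro c hc; simpa using (fc_sorted_zero item.toList (gs.take seg.toNat)).mp h c hc
      · right; intro c hc; simpa using (fc_sorted_one item.toList (gs.take seg.toNat)).mp h c hc
    · rintro ⟨k, h5, hlt, hwin⟩
      refine ⟨(k : Int), ?_, ?_⟩
      · rw [PySem.List.mem_pyRange_one]; omega
      · rw [List.any_eq_true]
        rw [winAt, List.any_eq_true] at hwin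
        obtain ⟨item, hitem, hcond⟩ := hwin
        refine ⟨item, hitem, ?_⟩
        have hslice : PySem.List.slice gs none (some (k : Int)) = gs.take k := by
          rw [PySem.List.slice_to (xs := gs) (b := (k:Int)) (by omega)]
          simp
        rw [hslice]
        rw [Bool.or_eq_true, Bool.and_eq_true, Bool.and_eq_true]
        rw [Bool.or_eq_true, List.all_eq_true, List.all_eq_true] at hcond
        rcases hcond with h | h
        · left
          exact ⟨(fc_sorted_zero item.toList (gs.take k)).mpr (fun c hc => by simpa using h c hc),
            by simp; omega⟩
        · right
          exact ⟨(fc_sorted_one item.toList (gs.take k)).mpr (fun c hc => by simpa using h c hc),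
            by simp; omega⟩
  · rw [if_neg h6]
    constructor
    · intro h; exact absurd h (by simp)
    · rintro ⟨k, h5, hlt, _⟩; omega

mutual
theorem evens_concat {α : Type} (l : List α) (c : α) :
    evens (l ++ [c]) = if l.length % 2 = 0 then evens l ++ [c] else evens l := by
  match l with
  | [] => simp [evens, odds]
  | a :: rest =>
    rw [List.cons_append, evens, evens, odds_concat rest c]
    by_cases h : rest.length % 2 = 0
    · simp [h]; omega
    · simp [h]; omega
theorem odds_concat {α : Type} (l : List α) (c : α) :
    odds (l ++ [c]) = if l.length % 2 = 0 then odds l else odds l ++ [c] := by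
  match l with
  | [] => simp [evens, odds]
  | a :: rest =>
    rw [List.cons_append, odds, odds, evens_concat rest c]
    by_cases h : rest.length % 2 = 0
    · simp [h]; omega
    · simp [h]; omega
end

theorem altWin_eq_winAt (gs : List Char) (k : Nat) (p1 p2 : PySem.Set Char)
    (h1 : ∀ x, PySem.Set.contains p1 x = true ↔ x ∈ evens (gs.take k))
    (h2 : ∀ x, PySem.Set.contains p2 x = true ↔ x ∈ odds (gs.take k)) :
    altWin p1 p2 = winAt gs k := by
  rw [Bool.eq_iff_iff]
  simp only [altWin, winAt, List.any_eq_true, Bool.or_eq_true, List.all_eq_true]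
  constructor
  · rintro ⟨w, hw, h⟩
    refine ⟨w, hw, ?_⟩
    rcases h with h | h
    · left; intro c hc; simpa using (h1 c).mp (h c hc)
    · right; intro c hc; simpa using (h2 c).mp (h c hc)
  · rintro ⟨w, hw, h⟩
    refine ⟨w, hw, ?_⟩
    rcases h with h | h
    · left; intro c hc; exact (h1 c).mpr (by simpa using h c hc)
    · right; intro c hc; exact (h2 c).mpr (by simpa using h c hc)

theorem altGo_iff (gs : List Char) : ∀ (rest : List Char) (i : Nat) (p1 p2 : PySem.Set Char),
    gs.take i ++ rest = gs → i ≤ gs.length →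
    (∀ x, PySem.Set.contains p1 x = true ↔ x ∈ evens (gs.take i)) →
    (∀ x, PySem.Set.contains p2 x = true ↔ x ∈ odds (gs.take i)) →
    (altGo gs.length i p1 p2 rest = true ↔
      ∃ k : Nat, i < k ∧ 5 ≤ k ∧ k < gs.length ∧ winAt gs k = true) := by
  intro rest
  induction rest with
  | nil =>
    intro i p1 p2 hpre hi _ _
    have hlen : i = gs.length := by
      have := congrArg List.length hpre
      simp [List.length_take, Nat.min_eq_left hi] at this
      omega
    rw [altGo]
    simp only [Bool.false_eq_true, false_iff, not_exists]
    rintro k ⟨hik, _, hk, _⟩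
    omega
  | cons ch rest' ih =>
    intro i p1 p2 hpre hi h1 h2
    have hlen : i + rest'.length + 1 = gs.length := by
      have := congrArg List.length hpre
      simp only [List.length_append, List.length_take, List.length_cons, Nat.min_eq_left hi] at this
      omega
    have hi1 : i + 1 ≤ gs.length := by omega
    have htake : gs.take (i + 1) = gs.take i ++ [ch] := by
      conv_lhs => rw [← hpre]
      rw [show i + 1 = (gs.take i).length + 1 by rw [List.length_take, Nat.min_eq_left hi]]
      rw [List.take_append]
      simp
    have hpre' : gs.take (i + 1) ++ rest' = gs := by
      rw [htake, List.append_assoc, List.singleton_append, hpre]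
    have hparlen : (gs.take i).length = i := by rw [List.length_take, Nat.min_eq_left hi]
    rw [altGo]
    -- the updated sets satisfy the invariant at i+1
    have h1' : ∀ x, PySem.Set.contains (if i % 2 = 0 then PySem.Set.add p1 ch else p1) x = true
        ↔ x ∈ evens (gs.take (i + 1)) := by
      intro x
      rw [htake, evens_concat, hparlen]
      by_cases hpar : i % 2 = 0
      · rw [if_pos hpar, if_pos hpar]
        rw [PySem.Set.contains_iff, PySem.Set.mem_add, List.mem_append]
        rw [← PySem.Set.contains_iff, h1 x]
        simp
      · rw [if_neg hpar, if_neg hpar]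
        exact h1 x
    have h2' : ∀ x, PySem.Set.contains (if i % 2 = 0 then p2 else PySem.Set.add p2 ch) x = true
        ↔ x ∈ odds (gs.take (i + 1)) := by
      intro x
      rw [htake, odds_concat, hparlen]
      by_cases hpar : i % 2 = 0
      · rw [if_pos hpar, if_pos hpar]
        exact h2 x
      · rw [if_neg hpar, if_neg hpar]
        rw [PySem.Set.contains_iff, PySem.Set.mem_add, List.mem_append]
        rw [← PySem.Set.contains_iff, h2 x]
        simp
    have hrec := ih (i + 1) _ _ hpre' hi1 h1' h2'
    have hwin : altWin (if i % 2 = 0 then PySem.Set.add p1 ch else p1)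
        (if i % 2 = 0 then p2 else PySem.Set.add p2 ch) = winAt gs (i + 1) :=
      altWin_eq_winAt gs (i + 1) _ _ h1' h2'
    by_cases hguard : 4 ≤ i ∧ i + 1 < gs.length
    · rw [if_pos hguard]
      by_cases hw : altWin (if i % 2 = 0 then PySem.Set.add p1 ch else p1)
          (if i % 2 = 0 then p2 else PySem.Set.add p2 ch) = true
      · rw [if_pos hw]
        simp only [true_iff]
        exact ⟨i + 1, by omega, by omega, hguard.2, by rw [← hwin]; exact hw⟩
      · rw [if_neg hw, hrec]
        constructor
        · rintro ⟨k, hik, h5, hk, hwk⟩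
          exact ⟨k, by omega, h5, hk, hwk⟩
        · rintro ⟨k, hik, h5, hk, hwk⟩
          refine ⟨k, ?_, h5, hk, hwk⟩
          rcases Nat.lt_or_ge (i + 1) k with h | h
          · exact h
          · exfalso
            have : k = i + 1 := by omega
            subst this
            rw [← hwin] at hwk
            exact hw hwk
    · rw [if_neg hguard, hrec]
      constructor
      · rintro ⟨k, hik, h5, hk, hwk⟩
        exact ⟨k, by omega, h5, hk, hwk⟩
      · rintro ⟨k, hik, h5, hk, hwk⟩
        refine ⟨k, ?_, h5, hk, hwk⟩
        rcases Nat.lt_or_ge (i + 1) k with h | h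
        · exact h
        · exfalso
          have : k = i + 1 := by omega
          subst this
          exact hguard ⟨by omega, hk⟩

theorem redundant_alt_iff (game : String) :
    redundant_alt game = true ↔
      ∃ k : Nat, 5 ≤ k ∧ k < game.toList.length ∧ winAt game.toList k = true := by
  unfold redundant_alt
  rw [altGo_iff game.toList game.toList 0 PySem.Set.empty PySem.Set.empty (by simp) (by simp)
    (by intro x; simp [PySem.Set.empty, PySem.Set.contains, evens])
    (by intro x; simp [PySem.Set.empty, PySem.Set.contains, odds])]
  constructor
  · rintro ⟨k, _, h5, hk, hw⟩; exact ⟨k, h5, hk, hw⟩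
  · rintro ⟨k, h5, hk, hw⟩; exact ⟨k, by omega, h5, hk, hw⟩



-- ===== VERDICT (by name: the statement is the Claim_ definition above) =====
theorem redundant_spec : Claim_equal_redundant := by
  intro game _
  unfold Spec_redundant
  rw [Bool.eq_iff_iff, redundant_iff, redundant_alt_iff]
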